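-- pv_equiv track=rewrite | github.com/almala333/EEBE-problemas-Jutge-Q1-24-25 | 03_Iteraciones/X69738_Kth word.py | kth_word
-- ===== SOURCE A (Python) =====
-- def kth_word(s, k):
--     '''
--     Parametres
--     ----------
--     s: str
--         La cadena de text que conté les paraules.
--     k: int
--         El número de la paraula que es vol obtenir.
--
--     Retorna
--     -------
--     str
--         La paraula numero k de la cadena de text, o una cadena buida si no existeix.
--
--     Tests públics
--     -------------
--     >>> kth_word('Alea iacta est', 3)
--     'est'
--     >>> kth_word('Alea iacta est', 1)
--     'Alea'
--     >>> kth_word('KingKong', 2)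
--     ''
--
--     Tests privats
--     -------------
--     >>> kth_word('Hola món', 2)
--     'món'
--     >>> kth_word('Això és un exemple', 4)
--     'exemple'
--     >>> kth_word('Bon dia', 3)
--     ''
--
--     '''
--
--     word_count = 0
--     word = ''
--     for i in s:
--         if i == ' ':
--             if word:
--                 word_count += 1
--                 if word_count == k:
--                     return word
--                 else:
--                     word = ''
--         else:
--             word += i
--     if word:
--         word_count += 1
--         if word_count == k:
--             return word
--     return ''
-- ===== SOURCE B (Python) =====
-- def kth_word(s, k):
--     words = [w for w in s.split(' ') if w]
--     return words[k - 1] if 1 <= k <= len(words) else ''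
-- ===== Notes on version B (the rewrite author's own statement) =====
-- stated objective: idiomatic
-- what changed: Replaces A's character-by-character scan with early return by building the full word list via s.split(' ') (dropping empty tokens) and indexing it at k-1.
import Mathlib
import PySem

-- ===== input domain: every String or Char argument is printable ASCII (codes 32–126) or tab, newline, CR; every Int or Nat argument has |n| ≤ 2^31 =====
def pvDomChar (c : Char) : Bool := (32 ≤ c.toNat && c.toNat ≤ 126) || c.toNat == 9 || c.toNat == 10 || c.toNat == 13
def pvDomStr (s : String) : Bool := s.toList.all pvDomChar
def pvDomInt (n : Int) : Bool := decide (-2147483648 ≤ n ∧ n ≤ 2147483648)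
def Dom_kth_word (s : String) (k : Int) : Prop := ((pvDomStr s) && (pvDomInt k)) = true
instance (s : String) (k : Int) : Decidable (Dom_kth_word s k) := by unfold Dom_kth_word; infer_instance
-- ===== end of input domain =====

-- B replaces A's character-by-character early-return scan with build-the-word-list-then-index (split on ' ', drop empty tokens); objective: idiomatic, same cost.

-- ===== PORT A =====
-- A's loop over the characters of s, carrying word_count and the current word;
-- the early 'return word' is the first branch of the space case, the post-loop
-- tail (if word: …; return '') is the [] case.
def kthWordScanA (k : Int) : List Char → Int → List Char → String
  | [], wc, word =>
      if word ≠ [] then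
        (if wc + 1 = k then String.ofList word else "")
      else ""
  | c :: rest, wc, word =>
      if c = ' ' then
        if word ≠ [] then
          (if wc + 1 = k then String.ofList word else kthWordScanA k rest (wc + 1) [])
        else kthWordScanA k rest wc word
      else kthWordScanA k rest wc (word ++ [c])

def kth_word (s : String) (k : Int) : String :=
  kthWordScanA k s.toList 0 []

-- ===== PORT B =====
-- Source B: words = [w for w in s.split(' ') if w]; return words[k - 1] if 1 <= k <= len(words) else ''
-- s.split(' ') is PySem.Str.split? with the nonempty separator " " (the none arm is unreachable).
def kth_word_alt (s : String) (k : Int) : String :=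
  match PySem.Str.split? s " " with
  | none => ""
  | some parts =>
      let words := parts.filter (fun w => w ≠ "")
      if 1 ≤ k ∧ k ≤ (words.length : Int) then
        (PySem.List.pyGet? words (k - 1)).getD ""
      else ""

-- ===== PRECONDITION & SPEC =====
def Spec_kth_word (s : String) (k : Int) (out : String) : Prop := out = kth_word_alt s k
instance (s : String) (k : Int) (out : String) : Decidable (Spec_kth_word s k out) := by unfold Spec_kth_word; infer_instance

-- ===== CLAIM (what is proved, stated in full; the proofs are below) =====
def Claim_equal_kth_word : Prop := ∀ (s : String) (k : Int), Dom_kth_word s k → Spec_kth_word s k (kth_word s k)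

-- ===== LEMMAS AND PROOFS =====

def tokGo : List Char → List Char → List (List Char)
  | [], cur => [cur.reverse]
  | c :: rest, cur => if c = ' ' then cur.reverse :: tokGo rest [] else tokGo rest (c :: cur)

lemma go_spec : ∀ (fuel : Nat) (l cur : List Char) (acc : List (List Char)), l.length < fuel →
    PySem.Chars.splitOn.go [' '] fuel l cur acc = acc.reverse ++ tokGo l cur := by
  intro fuel
  induction fuel with
  | zero => intro l cur acc h; omega
  | succ n ih =>
    intro l cur acc h
    cases l with
    | nil => simp [PySem.Chars.splitOn.go, tokGo]
    | cons c rest =>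
      simp only [PySem.Chars.splitOn.go]
      by_cases hc : c = ' '
      · subst hc
        rw [if_pos (by simp [List.isPrefixOf])]
        simp only [List.length_cons, List.length_nil, List.drop_succ_cons, List.drop_zero]
        rw [ih rest [] (cur.reverse :: acc) (by simp at h; omega)]
        simp [tokGo]
      · rw [if_neg (by simp [List.isPrefixOf]; intro h'; exact absurd h'.symm hc)]
        rw [ih rest (c :: cur) acc (by simp at h ⊢; omega)]
        simp [tokGo, hc]

lemma splitOn_eq_tokGo (s : List Char) : PySem.Chars.splitOn s [' '] = tokGo s [] := by
  rw [PySem.Chars.splitOn, go_spec (s.length + 1) s [] [] (by omega)]; simp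

lemma tokGo_no_space : ∀ (word : List Char), ' ' ∉ word → ∀ l cur, tokGo (word ++ l) cur = tokGo l (word.reverse ++ cur) := by
  intro word
  induction word with
  | nil => intro _ l cur; simp
  | cons c w ih =>
    intro h l cur
    have hc : c ≠ ' ' := fun e => h (by simp [e])
    have hw : ' ' ∉ w := fun e => h (by simp [e])
    simp only [List.cons_append, tokGo, if_neg hc]
    rw [ih hw l (c :: cur)]
    simp

def bVal (k wc : Int) (W : List (List Char)) : String :=
  if wc < k ∧ k ≤ wc + W.length then String.ofList ((W[(k - wc - 1).toNat]?).getD []) else ""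

lemma scan_eq (k : Int) : ∀ (cs : List Char) (wc : Int) (word : List Char), ' ' ∉ word →
    kthWordScanA k cs wc word = bVal k wc ((PySem.Chars.splitOn (word ++ cs) [' ']).filter (· ≠ [])) := by
  intro cs
  induction cs with
  | nil =>
    intro wc word h
    rw [splitOn_eq_tokGo, tokGo_no_space word h [] []]
    simp only [tokGo, List.append_nil, List.reverse_reverse]
    by_cases hw : word = []
    · subst hw
      simp [kthWordScanA, bVal]
    · have hfil : ([word].filter (· ≠ [])) = [word] := by simp [hw]
      rw [hfil]
      have hA : kthWordScanA k [] wc word =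
          (if wc + 1 = k then String.ofList word else "") := by
        simp [kthWordScanA, hw]
      rw [hA]
      unfold bVal
      by_cases hk : wc + 1 = k
      · rw [if_pos hk, if_pos (by refine ⟨by omega, ?_⟩; simp; omega)]
        have h0 : (k - wc - 1).toNat = 0 := by omega
        simp [h0]
      · rw [if_neg hk, if_neg (by simp; omega)]
  | cons c rest ih =>
    intro wc word h
    by_cases hc : c = ' '
    · subst hc
      have hsplit : PySem.Chars.splitOn (word ++ ' ' :: rest) [' '] = word :: PySem.Chars.splitOn rest [' '] := by
        rw [splitOn_eq_tokGo, tokGo_no_space word h (' ' :: rest) [], splitOn_eq_tokGo]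
        simp [tokGo]
      rw [hsplit]
      by_cases hw : word = []
      · subst hw
        have hfil : (([] : List Char) :: PySem.Chars.splitOn rest [' ']).filter (· ≠ []) =
            (PySem.Chars.splitOn rest [' ']).filter (· ≠ []) := by simp
        rw [hfil]
        have ih' := ih wc [] (by simp)
        simp only [List.nil_append] at ih'
        rw [← ih']
        simp [kthWordScanA]
      · have hfil : ((word :: PySem.Chars.splitOn rest [' ']).filter (· ≠ [])) =
            word :: (PySem.Chars.splitOn rest [' ']).filter (· ≠ []) := by
          simp [hw]
        rw [hfil]
        have hA : kthWordScanA k (' ' :: rest) wc word =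
            (if wc + 1 = k then String.ofList word else kthWordScanA k rest (wc + 1) []) := by
          simp [kthWordScanA, hw]
        rw [hA]
        set W' := (PySem.Chars.splitOn rest [' ']).filter (· ≠ []) with hW'
        by_cases hk : wc + 1 = k
        · rw [if_pos hk]
          unfold bVal
          rw [if_pos (by refine ⟨by omega, ?_⟩; simp; omega)]
          have h0 : (k - wc - 1).toNat = 0 := by omega
          simp [h0]
        · rw [if_neg hk]
          have ih' := ih (wc + 1) [] (by simp)
          simp only [List.nil_append] at ih'
          rw [ih', ← hW']
          unfold bVal
          by_cases hcond : wc + 1 < k ∧ k ≤ wc + 1 + (W'.length : Int)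
          · rw [if_pos hcond, if_pos (by refine ⟨by omega, ?_⟩; simp; omega)]
            have h1 : (k - wc - 1).toNat = (k - (wc + 1) - 1).toNat + 1 := by omega
            rw [h1, List.getElem?_cons_succ]
          · rw [if_neg hcond, if_neg (by simp; omega)]
    · have hA : kthWordScanA k (c :: rest) wc word = kthWordScanA k rest wc (word ++ [c]) := by
        simp [kthWordScanA, hc]
      rw [hA]
      have h' : ' ' ∉ word ++ [c] := by
        simp [h]
        exact fun e => hc e.symm
      rw [ih wc (word ++ [c]) h', List.append_assoc]
      simp

theorem kth_word_eq (s : String) (k : Int) : kth_word s k = kth_word_alt s k := by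
  obtain ⟨parts, hp⟩ : ∃ parts, PySem.Str.split? s " " = some parts := by
    have h := PySem.Str.split?_map s " "
    cases hsp : PySem.Str.split? s " " with
    | none => rw [hsp] at h; simp [PySem.Chars.split?] at h
    | some parts => exact ⟨parts, rfl⟩
  have hmap : parts.map String.toList = PySem.Chars.splitOn s.toList [' '] := by
    have h := PySem.Str.split?_map s " "
    rw [hp] at h
    simp [PySem.Chars.split?] at h
    exact h
  have hwords : (parts.filter (fun w => w ≠ "")).map String.toList
      = (PySem.Chars.splitOn s.toList [' ']).filter (· ≠ []) := by
    rw [← hmap, List.filter_map]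
    congr 1
    apply List.filter_congr
    intro w _
    simp [Function.comp, String.toList_eq_nil_iff]
  set words := parts.filter (fun w => w ≠ "") with hw
  set W := (PySem.Chars.splitOn s.toList [' ']).filter (· ≠ []) with hWdef
  have hlen : W.length = words.length := by rw [← hwords]; simp
  have hscan : kth_word s k = bVal k 0 W := by
    rw [kth_word, scan_eq k s.toList 0 [] (by simp)]
    congr 1
  rw [hscan]
  rw [kth_word_alt, hp]
  simp only [bVal, ← hw]
  by_cases hcond : 1 ≤ k ∧ k ≤ (words.length : Int)
  · rw [if_pos (by rw [hlen]; omega), if_pos hcond]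
    have hk1 : k - 1 = ((k - 1).toNat : Int) := by omega
    rw [hk1, PySem.List.pyGet?_natCast]
    have hW : W[(k - 0 - 1).toNat]? = (words[(k-1).toNat]?).map String.toList := by
      rw [← hwords, List.getElem?_map]
      congr 2
      omega
    rw [hW]
    have hlt : (k-1).toNat < words.length := by omega
    rw [List.getElem?_eq_getElem hlt]
    simp
  · rw [if_neg (by rw [hlen]; omega), if_neg hcond]

-- ===== VERDICT (by name: the statement is the Claim_ definition above) =====
theorem kth_word_spec : Claim_equal_kth_word := by
  intro s k _
  unfold Spec_kth_word
  exact kth_word_eq s k
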